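-- pv_equiv track=rewrite | github.com/sbkapelner/IPR-Dashboard | load_issue_analysis_non_discretionary.py | choose_end_heading
-- ===== SOURCE A (Python) =====
-- def section_hits(text, needle):
--     hits = []
--     start = 0
--     while True:
--         index = text.find(needle, start)
--         if index == -1:
--             break
--         hits.append(index)
--         start = index + 1
--     return hits
--
-- def choose_end_heading(text):
--     for heading in ("V. CONCLUSION", "V. Conclusion", "Conclusion", "CONCLUSION"):
--         hits = section_hits(text, heading)
--         if len(hits) >= 2:
--             return heading, hits[1]
--         if hits:
--             return heading, hits[0]
--     return None, -1
-- ===== SOURCE B (Python) =====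
-- def choose_end_heading(text):
--     for heading in ("V. CONCLUSION", "V. Conclusion", "Conclusion", "CONCLUSION"):
--         first = text.find(heading)
--         if first == -1:
--             continue
--         second = text.find(heading, first + 1)
--         return (heading, second) if second != -1 else (heading, first)
--     return None, -1
-- ===== Notes on version B (the rewrite author's own statement) =====
-- stated objective: simpler
-- what changed: Replaces the section_hits helper that scans the whole text collecting every occurrence with at most two bounded str.find calls per heading (first occurrence, then one more search after it), dropping the hits list entirely.
import Mathlib
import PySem

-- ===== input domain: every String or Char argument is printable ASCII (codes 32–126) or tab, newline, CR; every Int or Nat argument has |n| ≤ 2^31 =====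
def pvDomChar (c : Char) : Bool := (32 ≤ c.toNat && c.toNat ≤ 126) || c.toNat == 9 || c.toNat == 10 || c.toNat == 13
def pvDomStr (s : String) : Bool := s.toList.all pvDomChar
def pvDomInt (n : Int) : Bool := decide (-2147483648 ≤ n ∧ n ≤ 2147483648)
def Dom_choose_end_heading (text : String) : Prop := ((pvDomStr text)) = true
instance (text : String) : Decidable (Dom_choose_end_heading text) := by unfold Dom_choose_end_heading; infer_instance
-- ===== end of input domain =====

-- ===== PORT A =====
-- B drops A's section_hits all-occurrences scan for at most two bounded find calls per heading (simpler).
-- Port of section_hits: the unbounded while-loop, fuelled; text.length + 2 steps always suffice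
-- (each iteration moves start past the previous hit, and a start beyond the text yields -1).
def sectionHits (fuel : Nat) (text needle : String) (start : Int) : List Int :=
  match fuel with
  | 0 => []
  | fuel + 1 =>
    let index := PySem.Str.findFrom text needle start none
    if index = -1 then []
    else index :: sectionHits fuel text needle (index + 1)

def chooseLoopA (text : String) : List String → Option String × Int
  | [] => (none, -1)
  | heading :: rest =>
    let hits := sectionHits (text.length + 2) text heading 0
    if 2 ≤ hits.length then (some heading, (PySem.List.pyGet? hits 1).getD (-1))
    else if hits ≠ [] then (some heading, (PySem.List.pyGet? hits 0).getD (-1))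
    else chooseLoopA text rest

def choose_end_heading (text : String) : Option String × Int :=
  chooseLoopA text ["V. CONCLUSION", "V. Conclusion", "Conclusion", "CONCLUSION"]

-- ===== PORT B =====
def chooseLoopB (text : String) : List String → Option String × Int
  | [] => (none, -1)
  | heading :: rest =>
    let first := PySem.Str.find text heading
    if first = -1 then chooseLoopB text rest
    else
      let second := PySem.Str.findFrom text heading (first + 1) none
      if second ≠ -1 then (some heading, second) else (some heading, first)

def choose_end_heading_alt (text : String) : Option String × Int :=
  chooseLoopB text ["V. CONCLUSION", "V. Conclusion", "Conclusion", "CONCLUSION"]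

-- ===== PRECONDITION & SPEC =====
def Spec_choose_end_heading (text : String) (out : Option String × Int) : Prop := out = choose_end_heading_alt text
instance (text : String) (out : Option String × Int) : Decidable (Spec_choose_end_heading text out) := by unfold Spec_choose_end_heading; infer_instance

-- ===== CLAIM (what is proved, stated in full; the proofs are below) =====
def Claim_equal_choose_end_heading : Prop := ∀ (text : String), Dom_choose_end_heading text → Spec_choose_end_heading text (choose_end_heading text)

-- ===== LEMMAS AND PROOFS =====

theorem loops_agree (text : String) (hs : List String) :
    chooseLoopA text hs = chooseLoopB text hs := by
  induction hs with
  | nil => rfl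
  | cons heading rest ih =>
    simp only [chooseLoopA, chooseLoopB, sectionHits]
    by_cases h1 : PySem.Chars.find text.toList heading.toList = -1
    · simp [h1, ih]
    · by_cases h2 : PySem.Chars.findFrom text.toList heading.toList
          (PySem.Chars.find text.toList heading.toList + 1) = -1
      · simp [h1, h2, PySem.List.pyGet?, PySem.List.pyIdx?]
      · simp [h1, h2, PySem.List.pyGet?, PySem.List.pyIdx?]

-- ===== VERDICT (by name: the statement is the Claim_ definition above) =====
theorem choose_end_heading_spec : Claim_equal_choose_end_heading := by
  intro text _
  unfold Spec_choose_end_heading choose_end_heading choose_end_heading_alt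
  exact loops_agree text _
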